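-- pv_equiv track=rewrite | github.com/kavinmahendran09/RemindMe_Backend | main.py | analyze_event_query
-- ===== SOURCE A (Python) =====
-- def analyze_event_query(message_text):
--     message_lower = message_text.lower()
--     month_names = {
--         'january': 1, 'february': 2, 'march': 3, 'april': 4, 'may': 5, 'june': 6,
--         'july': 7, 'august': 8, 'september': 9, 'october': 10, 'november': 11, 'december': 12
--     }
--     for month_name, month_num in month_names.items():
--         if month_name in message_lower:
--             return f'specific_month_{month_num}'
--     if any(word in message_lower for word in ['this month', 'current month', 'month']):
--         return 'current_month'
--     elif any(word in message_lower for word in ['next month', 'following month']):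
--         return 'next_month'
--     elif any(word in message_lower for word in ['this week', 'current week', 'week']):
--         return 'current_week'
--     elif any(word in message_lower for word in ['upcoming', 'future', 'coming', 'ahead']):
--         return 'upcoming'
--     elif any(word in message_lower for word in ['all', 'everything', 'list']):
--         return 'all'
--     else:
--         return 'current_month'
-- ===== SOURCE B (Python) =====
-- KEYWORD_PRIORITY = [
--     ('january', 0), ('february', 1), ('march', 2), ('april', 3),
--     ('may', 4), ('june', 5), ('july', 6), ('august', 7),
--     ('september', 8), ('october', 9), ('november', 10), ('december', 11),
--     ('this month', 12), ('current month', 12), ('month', 12),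
--     ('next month', 13), ('following month', 13),
--     ('this week', 14), ('current week', 14), ('week', 14),
--     ('upcoming', 15), ('future', 15), ('coming', 15), ('ahead', 15),
--     ('all', 16), ('everything', 16), ('list', 16),
-- ]
--
-- LABELS = [
--     'specific_month_1', 'specific_month_2', 'specific_month_3',
--     'specific_month_4', 'specific_month_5', 'specific_month_6',
--     'specific_month_7', 'specific_month_8', 'specific_month_9',
--     'specific_month_10', 'specific_month_11', 'specific_month_12',
--     'current_month', 'next_month', 'current_week', 'upcoming', 'all',
--     'current_month',  # fallback when nothing matches
-- ]
--
-- def analyze_event_query(message_text):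
--     ml = message_text.lower()
--     matched = [p for w, p in KEYWORD_PRIORITY if w in ml]
--     best = min(matched) if matched else len(LABELS) - 1
--     return LABELS[best]
-- ===== Notes on version B (the rewrite author's own statement) =====
-- stated objective: alternative
-- what changed: B replaces A's ordered first-match scan (month-dict loop plus five-branch if/elif any-chain with early returns) by an aggregate computation: one comprehension collects the priorities of ALL matching keywords, min() picks the best, and a label table is indexed by it; correctness rests on the priorities being listed in A's branch order.
import Mathlib
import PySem

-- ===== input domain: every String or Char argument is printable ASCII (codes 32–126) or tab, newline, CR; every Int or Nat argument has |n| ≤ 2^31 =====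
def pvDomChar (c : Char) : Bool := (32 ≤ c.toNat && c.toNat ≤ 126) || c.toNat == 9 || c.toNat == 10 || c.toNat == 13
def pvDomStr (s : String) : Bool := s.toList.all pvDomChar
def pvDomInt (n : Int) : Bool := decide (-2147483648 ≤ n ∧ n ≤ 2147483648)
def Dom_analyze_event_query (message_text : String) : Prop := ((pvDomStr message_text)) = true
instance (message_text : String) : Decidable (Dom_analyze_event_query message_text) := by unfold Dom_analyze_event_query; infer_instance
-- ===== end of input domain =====

-- ===== PORT A =====
-- B computes the minimum priority over ALL matching keywords and indexes a label table,
-- instead of A's ordered early-return scan (objective: alternative).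
def pvMonthNames : List (String × Int) :=
  [("january", 1), ("february", 2), ("march", 3), ("april", 4), ("may", 5), ("june", 6),
   ("july", 7), ("august", 8), ("september", 9), ("october", 10), ("november", 11), ("december", 12)]

def pvMonthLoop (ml : String) : List (String × Int) → Option String
  | [] => none
  | (name, num) :: rest =>
      if PySem.Str.isIn name ml then some ("specific_month_" ++ PySem.Int.toStr num)
      else pvMonthLoop ml rest

def analyze_event_query (message_text : String) : String :=
  let ml := PySem.Str.lower message_text
  match pvMonthLoop ml pvMonthNames with
  | some r => r
  | none =>
    if ["this month", "current month", "month"].any (fun w => PySem.Str.isIn w ml) then "current_month"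
    else if ["next month", "following month"].any (fun w => PySem.Str.isIn w ml) then "next_month"
    else if ["this week", "current week", "week"].any (fun w => PySem.Str.isIn w ml) then "current_week"
    else if ["upcoming", "future", "coming", "ahead"].any (fun w => PySem.Str.isIn w ml) then "upcoming"
    else if ["all", "everything", "list"].any (fun w => PySem.Str.isIn w ml) then "all"
    else "current_month"

-- ===== PORT B =====
def pvKeywordPriority : List (String × Int) :=
  [("january", 0), ("february", 1), ("march", 2), ("april", 3),
   ("may", 4), ("june", 5), ("july", 6), ("august", 7),
   ("september", 8), ("october", 9), ("november", 10), ("december", 11),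
   ("this month", 12), ("current month", 12), ("month", 12),
   ("next month", 13), ("following month", 13),
   ("this week", 14), ("current week", 14), ("week", 14),
   ("upcoming", 15), ("future", 15), ("coming", 15), ("ahead", 15),
   ("all", 16), ("everything", 16), ("list", 16)]

def pvLabels : List String :=
  ["specific_month_1", "specific_month_2", "specific_month_3",
   "specific_month_4", "specific_month_5", "specific_month_6",
   "specific_month_7", "specific_month_8", "specific_month_9",
   "specific_month_10", "specific_month_11", "specific_month_12",
   "current_month", "next_month", "current_week", "upcoming", "all",
   "current_month"]

def analyze_event_query_alt (message_text : String) : String :=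
  let ml := PySem.Str.lower message_text
  let matched := (pvKeywordPriority.filter (fun wp => PySem.Str.isIn wp.1 ml)).map Prod.snd
  let best : Int :=
    match PySem.List.min? matched (fun x => x) with
    | some m => m
    | none => (pvLabels.length : Int) - 1
  PySem.List.pyGetD pvLabels best ""

-- ===== PRECONDITION & SPEC =====
def Spec_analyze_event_query (message_text : String) (out : String) : Prop := out = analyze_event_query_alt message_text
instance (message_text : String) (out : String) : Decidable (Spec_analyze_event_query message_text out) := by unfold Spec_analyze_event_query; infer_instance

-- ===== CLAIM (what is proved, stated in full; the proofs are below) =====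
def Claim_equal_analyze_event_query : Prop := ∀ (message_text : String), Dom_analyze_event_query message_text → Spec_analyze_event_query message_text (analyze_event_query message_text)

-- ===== LEMMAS AND PROOFS =====

-- A's behaviour as a first-match scan over (keyword, priority) pairs with default d.
def pvFirstD (ml : String) (d : Int) : List (String × Int) → Int
  | [] => d
  | (w, p) :: rest => if PySem.Str.isIn w ml then p else pvFirstD ml d rest

theorem pv_foldl_min_eq_self (a : Int) (l : List Int) (h : ∀ x ∈ l, a ≤ x) :
    l.foldl min a = a := by
  rcases PySem.List.foldl_min_mem l a with hm | hm
  · exact hm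
  · exact le_antisymm (PySem.List.foldl_min_le l a).1 (h _ hm)

-- first-match = min-of-matches when priorities are nondecreasing and ≤ d.
theorem pv_first_eq_min (ml : String) (d : Int) :
    ∀ (l : List (String × Int)),
      (l.map Prod.snd).Pairwise (· ≤ ·) →
      (∀ x ∈ l.map Prod.snd, x ≤ d) →
      pvFirstD ml d l =
        (match PySem.List.min? ((l.filter (fun wp => PySem.Str.isIn wp.1 ml)).map Prod.snd)
            (fun x => x) with
         | some m => m
         | none => d) := by
  intro l
  induction l with
  | nil => intro _ _; simp [pvFirstD, PySem.List.min?]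
  | cons hd rest ih =>
    obtain ⟨w, p⟩ := hd
    intro hpw hle
    simp only [List.map_cons, List.pairwise_cons] at hpw
    by_cases hin : PySem.Str.isIn w ml = true
    · have hfold : ((rest.filter (fun wp => PySem.Str.isIn wp.1 ml)).map Prod.snd).foldl min p = p := by
        apply pv_foldl_min_eq_self
        intro x hx
        simp only [List.mem_map, List.mem_filter] at hx
        obtain ⟨wp, ⟨hmem, _⟩, hsnd⟩ := hx
        exact hsnd ▸ hpw.1 _ (List.mem_map_of_mem hmem)
      simp only [pvFirstD, hin, if_true, List.filter_cons, List.map_cons,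
        PySem.List.min?_id_cons]
      exact hfold.symm
    · rw [Bool.not_eq_true] at hin
      simp only [pvFirstD, hin, Bool.false_eq_true, if_false, List.filter_cons]
      exact ih hpw.2 (fun x hx => hle x (List.mem_cons_of_mem _ hx))

set_option maxHeartbeats 4000000 in
theorem pv_a_eq_first (m : String) :
    analyze_event_query m = PySem.List.pyGetD pvLabels (pvFirstD (PySem.Str.lower m) 17 pvKeywordPriority) "" := by
  unfold analyze_event_query
  generalize PySem.Str.lower m = ml
  simp only [pvMonthNames, pvKeywordPriority, pvMonthLoop, pvFirstD, List.any_cons, List.any_nil,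
    Bool.or_false]
  generalize PySem.Str.isIn "january" ml = b1
  generalize PySem.Str.isIn "february" ml = b2
  generalize PySem.Str.isIn "march" ml = b3
  generalize PySem.Str.isIn "april" ml = b4
  generalize PySem.Str.isIn "may" ml = b5
  generalize PySem.Str.isIn "june" ml = b6
  generalize PySem.Str.isIn "july" ml = b7
  generalize PySem.Str.isIn "august" ml = b8
  generalize PySem.Str.isIn "september" ml = b9
  generalize PySem.Str.isIn "october" ml = b10
  generalize PySem.Str.isIn "november" ml = b11
  generalize PySem.Str.isIn "december" ml = b12
  generalize PySem.Str.isIn "this month" ml = b13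
  generalize PySem.Str.isIn "current month" ml = b14
  generalize PySem.Str.isIn "month" ml = b15
  generalize PySem.Str.isIn "next month" ml = b16
  generalize PySem.Str.isIn "following month" ml = b17
  generalize PySem.Str.isIn "this week" ml = b18
  generalize PySem.Str.isIn "current week" ml = b19
  generalize PySem.Str.isIn "week" ml = b20
  generalize PySem.Str.isIn "upcoming" ml = b21
  generalize PySem.Str.isIn "future" ml = b22
  generalize PySem.Str.isIn "coming" ml = b23
  generalize PySem.Str.isIn "ahead" ml = b24
  generalize PySem.Str.isIn "all" ml = b25
  generalize PySem.Str.isIn "everything" ml = b26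
  generalize PySem.Str.isIn "list" ml = b27
  cases b1 with
  | true => rfl
  | false =>
    cases b2 with
    | true => rfl
    | false =>
      cases b3 with
      | true => rfl
      | false =>
        cases b4 with
        | true => rfl
        | false =>
          cases b5 with
          | true => rfl
          | false =>
            cases b6 with
            | true => rfl
            | false =>
              cases b7 with
              | true => rfl
              | false =>
                cases b8 with
                | true => rfl
                | false =>
                  cases b9 with
                  | true => rfl
                  | false =>
                    cases b10 with
                    | true => rfl
                    | false =>
                      cases b11 with
                      | true => rfl
                      | false =>
                        cases b12 with
                        | true => rfl
                        | false =>
                          cases b13 with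
                          | true => rfl
                          | false =>
                            cases b14 with
                            | true => rfl
                            | false =>
                              cases b15 with
                              | true => rfl
                              | false =>
                                cases b16 with
                                | true => rfl
                                | false =>
                                  cases b17 with
                                  | true => rfl
                                  | false =>
                                    cases b18 with
                                    | true => rfl
                                    | false =>
                                      cases b19 with
                                      | true => rfl
                                      | false =>
                                        cases b20 with
                                        | true => rfl
                                        | false =>
                                          cases b21 with
                                          | true => rfl
                                          | false =>
                                            cases b22 with
                                            | true => rfl
                                            | false =>
                                              cases b23 with
                                              | true => rfl
                                              | false =>
                                                cases b24 with
                                                | true => rfl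
                                                | false =>
                                                  cases b25 with
                                                  | true => rfl
                                                  | false =>
                                                    cases b26 with
                                                    | true => rfl
                                                    | false =>
                                                      cases b27 with
                                                      | true => rfl
                                                      | false =>
                                                        rfl

-- ===== VERDICT (by name: the statement is the Claim_ definition above) =====
theorem analyze_event_query_spec : Claim_equal_analyze_event_query := by
  intro s _
  unfold Spec_analyze_event_query
  rw [pv_a_eq_first]
  unfold analyze_event_query_alt
  have hlen : ((pvLabels.length : Int) - 1) = 17 := by decide
  rw [hlen, pv_first_eq_min (PySem.Str.lower s) 17 pvKeywordPriority (by decide) (by decide)]
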